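-- pv_equiv track=rewrite | github.com/lauraarodriguez11/master_ucm | trabajos/4/language_budget_countries.py | reducer
-- ===== SOURCE A (Python) =====
-- def reducer(key, values):
--     """
--     Reducer: Aggregates the budget for each language, with countries listed.
--     """
--     country_budgets = {}
--     for country, budget in values:
--         if country not in country_budgets:
--             country_budgets[country] = 0
--         country_budgets[country] += budget
--
--     total_budget = sum(country_budgets.values())
--     countries = list(country_budgets.keys())
--     yield key, (countries, total_budget)
-- ===== SOURCE B (Python) =====
-- def reducer(key, values):
--     """Materialize the rows, then two staged builtin reductions over the two
--     columns: dedup of the country column via dict.fromkeys, and sum over the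
--     budget column; no per-country budget dict, no membership test, no
--     hand-written accumulation loop."""
--     rows = list(values)
--     countries = list(dict.fromkeys(country for country, _ in rows))
--     total_budget = sum(budget for _, budget in rows)
--     yield key, (countries, total_budget)
-- ===== Notes on version B (the rewrite author's own statement) =====
-- stated objective: idiomatic
-- what changed: Replaces A's hand-written loop that builds a per-country budget dict (plus its two post-loop reductions) with two staged builtin column reductions over a materialized row list: dict.fromkeys for the ordered distinct countries and sum over all budgets directly, never forming per-country subtotals.
import Mathlib
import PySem

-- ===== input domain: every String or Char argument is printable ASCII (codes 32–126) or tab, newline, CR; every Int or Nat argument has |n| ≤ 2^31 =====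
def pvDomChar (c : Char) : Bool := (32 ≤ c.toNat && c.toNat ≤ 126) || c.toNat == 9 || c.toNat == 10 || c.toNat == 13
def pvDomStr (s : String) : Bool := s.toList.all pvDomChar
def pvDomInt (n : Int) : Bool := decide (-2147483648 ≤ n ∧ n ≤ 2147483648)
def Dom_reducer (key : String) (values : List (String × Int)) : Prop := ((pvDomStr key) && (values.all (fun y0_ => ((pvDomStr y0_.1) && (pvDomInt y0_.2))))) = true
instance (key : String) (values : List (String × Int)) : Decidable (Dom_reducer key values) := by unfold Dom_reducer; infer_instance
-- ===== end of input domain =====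

-- B drops A's per-country budget dict for two staged column reductions (dedup of the
-- country column, sum of the budget column) over the materialized rows; idiomatic,
-- same cost; return value only — both Pythons are generators.


-- ===== PORT A =====
def reducer (key : String) (values : List (String × Int)) : List (String × (List String × Int)) :=
  let country_budgets : PySem.Dict String Int :=
    values.foldl (fun d p =>
      let d := if d.contains p.1 then d else d.insert p.1 0
      d.insert p.1 (d.getD p.1 0 + p.2)) PySem.Dict.empty
  let total_budget : Int := country_budgets.values.sum
  let countries : List String := country_budgets.keys
  [(key, (countries, total_budget))]

-- ===== PORT B =====
def reducer_alt (key : String) (values : List (String × Int)) : List (String × (List String × Int)) :=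
  let rows := values
  let countries : List String := PySem.List.dedup (rows.map Prod.fst)
  let total_budget : Int := (rows.map Prod.snd).sum
  [(key, (countries, total_budget))]

-- ===== PRECONDITION & SPEC =====
def Spec_reducer (key : String) (values : List (String × Int)) (out : List (String × (List String × Int))) : Prop := out = reducer_alt key values
instance (key : String) (values : List (String × Int)) (out : List (String × (List String × Int))) : Decidable (Spec_reducer key values out) := by unfold Spec_reducer; infer_instance

-- ===== CLAIM =====
def Claim_equal_reducer : Prop := ∀ (key : String) (values : List (String × Int)), Dom_reducer key values → Spec_reducer key values (reducer key values)

-- ===== LEMMAS AND PROOFS =====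

-- A's loop body, with its guarded pre-insert of 0, is a single overwriting insert
lemma stepA_eq :
    (fun (d : PySem.Dict String Int) (p : String × Int) =>
      let d := if d.contains p.1 then d else d.insert p.1 0
      d.insert p.1 (d.getD p.1 0 + p.2))
    = (fun (d : PySem.Dict String Int) (p : String × Int) =>
        d.insert p.1 (d.getD p.1 0 + p.2)) := by
  funext d p
  by_cases hc : d.contains p.1 = true
  · simp [hc]
  · simp only [hc, Bool.false_eq_true, if_false]
    rw [PySem.Dict.getD_insert_self, PySem.Dict.insert_insert_self,
        PySem.Dict.getD_of_not_contains d 0 (by simpa using hc)]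

-- sum over a Nodup list with one position's image changed
lemma sum_map_update (cs : List String) (k : String) (v : Int) (f : String → Int)
    (hnd : cs.Nodup) (hmem : k ∈ cs) :
    (cs.map (fun k' => if k' = k then v else f k')).sum = (cs.map f).sum - f k + v := by
  induction cs with
  | nil => cases hmem
  | cons a t ih =>
    obtain ⟨hna, hndt⟩ := List.nodup_cons.mp hnd
    rcases List.mem_cons.mp hmem with h | h
    · subst h
      have hm : t.map (fun k' => if k' = k then v else f k') = t.map f := by
        apply List.map_congr_left
        intro x hx
        have hxk : ¬ x = k := fun e => hna (e ▸ hx)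
        simp [hxk]
      simp [hm]
      ring
    · have hak : ¬ a = k := fun e => hna (e ▸ h)
      simp only [List.map_cons, List.sum_cons, if_neg hak, ih hndt h]
      ring

-- the sum of the dict's values after the accumulation loop is the plain column sum
lemma sum_inv (l : List (String × Int)) (d : PySem.Dict String Int) (hnd : d.keys.Nodup) :
    (l.foldl (fun d p => d.insert p.1 (d.getD p.1 0 + p.2)) d).values.sum
      = d.values.sum + (l.map Prod.snd).sum := by
  induction l generalizing d with
  | nil => simp
  | cons p t ih =>
    obtain ⟨k, b⟩ := p
    have hnd' : (d.insert k (d.getD k 0 + b)).keys.Nodup := PySem.Dict.nodup_keys_insert _ _ _ hnd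
    have hstep : (d.insert k (d.getD k 0 + b)).values.sum = d.values.sum + b := by
      by_cases hc : d.contains k = true
      · have hmem : k ∈ d.keys := (PySem.Dict.contains_iff_mem_keys d k).mp hc
        have hk2 : (d.insert k (d.getD k 0 + b)).keys = d.keys :=
          PySem.Dict.keys_insert_of_contains d _ hc
        rw [PySem.Dict.values_eq_map_keys _ hnd' 0, hk2]
        have : d.keys.map (fun k' => (d.insert k (d.getD k 0 + b)).getD k' 0)
            = d.keys.map (fun k' => if k' = k then d.getD k 0 + b else d.getD k' 0) := by
          apply List.map_congr_left; intro x _; rw [PySem.Dict.getD_insert]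
        rw [this, sum_map_update d.keys k _ _ hnd hmem,
            ← PySem.Dict.values_eq_map_keys d hnd 0]
        omega
      · have hc' : d.contains k = false := by simpa using hc
        have h0 : d.getD k 0 = 0 := PySem.Dict.getD_of_not_contains d 0 hc'
        simp only [PySem.Dict.values, PySem.Dict.items_insert_of_not_contains d _ hc', h0]
        simp
    rw [List.foldl_cons, ih _ hnd', hstep, List.map_cons, List.sum_cons]
    ring

-- ===== VERDICT =====
theorem reducer_spec : Claim_equal_reducer := by
  intro key values _
  show reducer key values = reducer_alt key values
  simp only [reducer, reducer_alt, stepA_eq]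
  rw [PySem.Dict.keys_foldl_insert_key (key := Prod.fst)
        (f := fun d p => d.getD p.1 0 + p.2) (d := PySem.Dict.empty),
      sum_inv values PySem.Dict.empty PySem.Dict.nodup_keys_empty]
  simp only [PySem.Dict.empty, PySem.Dict.values]
  simp [PySem.List.dedup_eq_ofList, PySem.Set.update_nil_left]
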